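-- pv_equiv track=rewrite | github.com/ErgodicEntropy/SchemaTheoremProver | Schemata.py | Total_Compression
-- ===== SOURCE A (Python) =====
-- def Total_Compression(wordset): #Compression is a mapping from strings/words to schemas (Compression requires at least 2 strings/words as input since ''similarity'' is a binary relation)
--     Schema = []
--     W = len(wordset)
--     sampleword = wordset[0]
--     L = len(sampleword)
--     j = 0
--     while j < L:
--         similarj = True
--         for k in range(1,W):
--             similarj = similarj * bool(sampleword[j] == wordset[k][j])
--         if similarj == True:
--             Schema.append(sampleword[j])
--         else:
--             Schema.append('*')
--
--         j = j + 1
--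
--     return Schema
-- ===== SOURCE B (Python) =====
-- def Total_Compression(wordset):
--     sampleword = wordset[0]
--     Schema = list(sampleword)
--     for k in range(1, len(wordset)):
--         word = wordset[k]
--         for j in range(len(sampleword)):
--             if word[j] != sampleword[j]:
--                 Schema[j] = '*'
--     return Schema
-- ===== Notes on version B (the rewrite author's own statement) =====
-- stated objective: alternative
-- what changed: Transposed decomposition: instead of A's per-position outer loop that re-scans every word and appends char-or-'*' to a growing output, B initializes the schema as list(wordset[0]) once and loops over the remaining words on the outside, marking mismatching positions '*' in place against the preserved reference word.
import Mathlib
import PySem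

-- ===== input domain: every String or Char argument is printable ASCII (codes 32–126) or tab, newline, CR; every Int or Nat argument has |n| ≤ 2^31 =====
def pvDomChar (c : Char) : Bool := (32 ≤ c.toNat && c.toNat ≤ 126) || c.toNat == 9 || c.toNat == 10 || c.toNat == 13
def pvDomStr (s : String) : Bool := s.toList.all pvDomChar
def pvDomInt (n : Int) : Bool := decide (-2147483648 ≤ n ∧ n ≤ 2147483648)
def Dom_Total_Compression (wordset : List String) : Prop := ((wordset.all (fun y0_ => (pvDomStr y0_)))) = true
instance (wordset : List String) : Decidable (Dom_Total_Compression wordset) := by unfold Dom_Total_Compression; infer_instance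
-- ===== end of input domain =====

-- B transposes A's loop nesting: it initializes the schema as list(wordset[0]) once and
-- star-marks mismatching positions in place while looping over the remaining words
-- (objective: alternative decomposition, same asymptotic cost).

-- ===== PORT A =====
-- A: for each position j of wordset[0], an inner pass over words 1..W-1 decides whether
-- all agree at j; the char or '*' is appended to a growing Schema.
def Total_Compression (wordset : List String) : List String :=
  let W : Int := PySem.List.len wordset
  let sampleword : List Char := (PySem.List.pyGetD wordset 0 "").toList
  let L : Int := PySem.List.len sampleword
  (PySem.List.pyRange 0 L 1).foldl (fun Schema j =>
    let similarj :=
      (PySem.List.pyRange 1 W 1).foldl (fun sim k =>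
        sim && (PySem.List.pyGetD sampleword j ' '
                  == PySem.List.pyGetD (PySem.List.pyGetD wordset k "").toList j ' ')) true
    if similarj then Schema ++ [String.singleton (PySem.List.pyGetD sampleword j ' ')]
    else Schema ++ ["*"]) []

-- ===== PORT B =====
-- B: schema starts as list(wordset[0]); outer loop over the remaining words, inner loop
-- over positions, setting '*' in place wherever the word differs from the reference word.
def Total_Compression_alt (wordset : List String) : List String :=
  let sampleword : List Char := (PySem.List.pyGetD wordset 0 "").toList
  let schema0 : List String := sampleword.map String.singleton
  (PySem.List.pyRange 1 (PySem.List.len wordset) 1).foldl (fun Schema k =>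
    let word : List Char := (PySem.List.pyGetD wordset k "").toList
    (PySem.List.pyRange 0 (PySem.List.len sampleword) 1).foldl (fun Sch j =>
      if PySem.List.pyGetD word j ' ' != PySem.List.pyGetD sampleword j ' '
      then PySem.List.pySetD Sch j "*" else Sch) Schema) schema0

-- ===== PRECONDITION & SPEC =====
-- Pre_ excludes exactly the inputs on which Python A raises IndexError: the empty list
-- (wordset[0] raises) and sets where some later word is shorter than wordset[0]
-- (wordset[k][j] raises); Python B raises IndexError on exactly the same inputs.
def Pre_Total_Compression (wordset : List String) : Prop :=
  wordset ≠ [] ∧ ∀ w ∈ wordset, (wordset.headD "").toList.length ≤ w.toList.length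
instance (wordset : List String) : Decidable (Pre_Total_Compression wordset) := by
  unfold Pre_Total_Compression; infer_instance
def pvWitness_Total_Compression : List String := ["abc", "abd", "xbc"]
def Spec_Total_Compression (wordset : List String) (out : List String) : Prop := out = Total_Compression_alt wordset
instance (wordset : List String) (out : List String) : Decidable (Spec_Total_Compression wordset out) := by unfold Spec_Total_Compression; infer_instance

-- ===== CLAIM (what is proved, stated in full; the proofs are below) =====
def Claim_equal_Total_Compression : Prop := ∀ (wordset : List String), Dom_Total_Compression wordset → Pre_Total_Compression wordset → Spec_Total_Compression wordset (Total_Compression wordset)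

-- ===== LEMMAS AND PROOFS =====
-- helper lemmas
theorem foldl_and_all {α : Type} (p : α → Bool) : ∀ (l : List α) (b : Bool),
    l.foldl (fun a x => a && p x) b = (b && l.all p)
  | [], b => by simp
  | x :: l, b => by
    simp [List.foldl_cons, foldl_and_all p l, Bool.and_assoc]

theorem foldl_append_ite {β : Type} (c : Int → Bool) (u v : Int → β) (l : List Int) (acc : List β) :
    l.foldl (fun acc2 j => if c j then acc2 ++ [u j] else acc2 ++ [v j]) acc
    = acc ++ l.map (fun j => if c j then u j else v j) := by
  have h : (fun (acc2 : List β) (j : Int) => if c j then acc2 ++ [u j] else acc2 ++ [v j])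
       = fun acc2 j => acc2 ++ [if c j then u j else v j] := by
    funext a j; split <;> rfl
  rw [h, PySem.List.foldl_append_singleton_eq_map]

theorem map_eq_range_map {α β : Type} (f : α → β) (d : α) (l : List α) :
    l.map f = (List.range l.length).map (fun m => f (l.getD m d)) := by
  apply List.ext_getElem <;> simp
  intro n h
  simp [h]

theorem inner_step_aux (q : Int → Bool) : ∀ (L : Nat) (g : Nat → String) (s : List String),
    (PySem.List.pyRange 0 (L:Int) 1).foldl
      (fun Sch j => if q j then PySem.List.pySetD Sch j "*" else Sch)
      ((List.range L).map g ++ s)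
    = (List.range L).map (fun (m : Nat) => if q ((m : Nat) : Int) then "*" else g m) ++ s
  | 0, g, s => by simp [PySem.List.pyRange_one_eq_nil]
  | (L+1), g, s => by
    have hr : PySem.List.pyRange 0 ((L:Int)+1) 1 = PySem.List.pyRange 0 (L:Int) 1 ++ [(L:Int)] := by
      have := PySem.List.pyRange_one_succ_right (a := 0) (b := (L:Int)) (by positivity)
      simpa using this
    push_cast
    rw [hr, List.foldl_append, List.range_succ, List.map_append, List.append_assoc,
        List.map_append]
    simp only [List.map_cons, List.map_nil]
    simp only [List.singleton_append]
    rw [inner_step_aux q L g (g L :: s)]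
    by_cases hq : q (L:Int)
    · simp only [hq, if_true, List.foldl_cons, List.foldl_nil]
      have hlen : ((List.range L).map (fun (m : Nat) => if q ((m : Nat) : Int) then "*" else g m)).length = L := by simp
      rw [PySem.List.pySetD_natCast]
      rw [List.set_append_right _ _ (by omega)]
      simp [List.append_assoc]
    · simp [hq, List.append_assoc]

theorem A_char (w0 : String) (rest : List String) :
    Total_Compression (w0 :: rest) =
    (List.range w0.toList.length).map (fun m =>
       if rest.all (fun w => w0.toList.getD m ' ' == w.toList.getD m ' ')
       then String.singleton (w0.toList.getD m ' ') else "*") := by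
  unfold Total_Compression
  simp only [PySem.List.len_eq, PySem.List.pyGetD_zero_cons]
  rw [foldl_append_ite]
  rw [PySem.List.pyRange_zero_nat, List.map_map, List.nil_append]
  apply List.map_congr_left
  intro m hm
  simp only [Function.comp_apply]
  rw [PySem.List.foldl_pyRange_pyGetD' (w0 :: rest) ""
        (fun sim w => sim && (PySem.List.pyGetD w0.toList (m:Int) ' '
            == PySem.List.pyGetD w.toList (m:Int) ' ')) true (by norm_num)]
  simp only [Int.toNat_one, List.drop_succ_cons, List.drop_zero, foldl_and_all, Bool.true_and]
  simp [PySem.List.pyGetD_natCast]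

theorem B_fold (w0 : String) : ∀ (rest : List String) (g : Nat → String),
    rest.foldl (fun Schema w =>
      (PySem.List.pyRange 0 (w0.toList.length:Int) 1).foldl (fun Sch j =>
        if PySem.List.pyGetD w.toList j ' ' != PySem.List.pyGetD w0.toList j ' '
        then PySem.List.pySetD Sch j "*" else Sch) Schema)
      ((List.range w0.toList.length).map g)
    = (List.range w0.toList.length).map (fun m =>
        if rest.any (fun w => w.toList.getD m ' ' != w0.toList.getD m ' ') then "*" else g m)
  | [], g => by simp
  | w :: ws, g => by
    rw [List.foldl_cons]
    have h1 := inner_step_aux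
      (fun j => PySem.List.pyGetD w.toList j ' ' != PySem.List.pyGetD w0.toList j ' ')
      w0.toList.length g []
    simp only [List.append_nil] at h1
    rw [h1, B_fold w0 ws _]
    apply List.map_congr_left
    intro m hm
    simp only [List.any_cons, PySem.List.pyGetD_natCast, List.getD]
    by_cases hw : w.toList[m]?.getD ' ' = w0.toList[m]?.getD ' ' <;> simp [hw]

theorem main_eq (w0 : String) (rest : List String) :
    Total_Compression (w0 :: rest) = Total_Compression_alt (w0 :: rest) := by
  rw [A_char]
  unfold Total_Compression_alt
  simp only [PySem.List.len_eq, PySem.List.pyGetD_zero_cons]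
  rw [PySem.List.foldl_pyRange_pyGetD' (w0 :: rest) ""
        (fun Schema w =>
          (PySem.List.pyRange 0 (w0.toList.length:Int) 1).foldl (fun Sch j =>
            if PySem.List.pyGetD w.toList j ' ' != PySem.List.pyGetD w0.toList j ' '
            then PySem.List.pySetD Sch j "*" else Sch) Schema)
        (w0.toList.map String.singleton) (by norm_num)]
  simp only [Int.toNat_one, List.drop_succ_cons, List.drop_zero]
  rw [map_eq_range_map String.singleton ' ' w0.toList, B_fold]
  apply List.map_congr_left
  intro m hm
  have hany : rest.any (fun w => w.toList.getD m ' ' != w0.toList.getD m ' ')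
      = !rest.all (fun w => w0.toList.getD m ' ' == w.toList.getD m ' ') := by
    have hfun : (fun (w : String) => !(w.toList.getD m ' ' != w0.toList.getD m ' '))
        = (fun (w : String) => w0.toList.getD m ' ' == w.toList.getD m ' ') := by
      funext w; simp [bne, Bool.beq_comm]
    rw [List.any_eq_not_all_not, hfun]
  rw [hany]
  cases hall : rest.all (fun w => w0.toList.getD m ' ' == w.toList.getD m ' ') <;> simp

-- ===== VERDICT (by name: the statement is the Claim_ definition above) =====
theorem Total_Compression_spec : Claim_equal_Total_Compression := by
  intro wordset hdom hpre
  unfold Spec_Total_Compression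
  cases wordset with
  | nil => exact absurd rfl hpre.1
  | cons w0 rest => exact main_eq w0 rest
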